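-- pv_equiv track=rewrite | github.com/TPS-qxx/Sciskill | sciskills/skills/paper_extractor/skill.py | _fields_for_mode
-- ===== SOURCE A (Python) =====
-- _MODE_FIELDS: dict[str, list[str]] = {
--     "metadata": ["title", "authors", "year", "venue", "abstract"],
--     "method": ["research_question", "problem_statement", "methodology", "datasets", "baselines"],
--     "experiment": ["metrics", "main_findings", "implementation_details"],
--     "full": ["limitations", "future_work"],
-- }
--
-- def _fields_for_mode(mode: str) -> list[str]:
--     """Return the cumulative set of fields to extract for a given mode."""
--     order = ["metadata", "method", "experiment", "full"]
--     fields: list[str] = []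
--     for m in order:
--         fields.extend(_MODE_FIELDS[m])
--         if m == mode:
--             break
--     return fields
-- ===== SOURCE B (Python) =====
-- _MODE_FIELDS: dict[str, list[str]] = {
--     "metadata": ["title", "authors", "year", "venue", "abstract"],
--     "method": ["research_question", "problem_statement", "methodology", "datasets", "baselines"],
--     "experiment": ["metrics", "main_findings", "implementation_details"],
--     "full": ["limitations", "future_work"],
-- }
--
-- # Cumulative table built ONCE at module load: mode -> all fields up to and including it.
-- _CUMULATIVE: dict[str, list[str]] = {}
-- _acc: list[str] = []
-- for _m, _fs in _MODE_FIELDS.items():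
--     _acc = _acc + _fs
--     _CUMULATIVE[_m] = _acc
--
-- def _fields_for_mode(mode: str) -> list[str]:
--     """Return the cumulative set of fields to extract for a given mode."""
--     return _CUMULATIVE.get(mode, _CUMULATIVE["full"])
-- ===== Notes on version B (the rewrite author's own statement) =====
-- stated objective: alternative
-- what changed: Replaces the per-call accumulate-and-break loop with a cumulative lookup table precomputed once at module load, so each call is a single dict lookup (fallback to the full list for unknown modes).
import Mathlib
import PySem

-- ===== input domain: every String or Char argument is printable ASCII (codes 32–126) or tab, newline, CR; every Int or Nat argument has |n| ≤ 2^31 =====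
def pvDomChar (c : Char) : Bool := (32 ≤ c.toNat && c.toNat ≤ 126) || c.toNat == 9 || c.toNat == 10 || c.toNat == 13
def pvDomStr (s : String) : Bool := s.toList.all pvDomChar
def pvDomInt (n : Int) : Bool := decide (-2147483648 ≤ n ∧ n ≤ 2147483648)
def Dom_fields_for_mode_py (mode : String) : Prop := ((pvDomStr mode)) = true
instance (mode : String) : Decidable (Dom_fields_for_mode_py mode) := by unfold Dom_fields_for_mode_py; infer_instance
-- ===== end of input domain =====

-- B drops A's per-call accumulate-and-break loop for a cumulative lookup table built once at
-- module load; each call is a single dict lookup with the full list as fallback.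

-- ===== PORT A =====
-- the module-level _MODE_FIELDS dict (shared context of both versions)
def pvModeFields : PySem.Dict String (List String) := PySem.Dict.ofList
  [ ("metadata", ["title", "authors", "year", "venue", "abstract"]),
    ("method", ["research_question", "problem_statement", "methodology", "datasets", "baselines"]),
    ("experiment", ["metrics", "main_findings", "implementation_details"]),
    ("full", ["limitations", "future_work"]) ]

-- A's loop with break: structural recursion over `order` carrying the accumulator `fields`.
-- `_MODE_FIELDS[m]` is ported as get? with getD []: every m iterated over is a key of the dict,
-- so the default is never taken (exact).
def pvALoop (mode : String) : List String → List String → List String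
  | fields, [] => fields
  | fields, m :: rest =>
      let fields' := fields ++ (pvModeFields.get? m).getD []
      if m == mode then fields' else pvALoop mode fields' rest

def fields_for_mode_py (mode : String) : List String :=
  let order := ["metadata", "method", "experiment", "full"]
  pvALoop mode [] order

-- ===== PORT B =====
-- the module-level builder loop: fold over _MODE_FIELDS.items() carrying (_CUMULATIVE, _acc)
def pvCumulative : PySem.Dict String (List String) :=
  (pvModeFields.items.foldl
    (fun (st : PySem.Dict String (List String) × List String) p =>
      let acc := st.2 ++ p.2
      (st.1.insert p.1 acc, acc))
    (PySem.Dict.empty, [])).1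

-- _CUMULATIVE.get(mode, _CUMULATIVE["full"]); "full" is a key of _CUMULATIVE, so getD [] is exact
def fields_for_mode_py_alt (mode : String) : List String :=
  (pvCumulative.get? mode).getD ((pvCumulative.get? "full").getD [])

-- ===== PRECONDITION & SPEC =====
def Spec_fields_for_mode_py (mode : String) (out : List String) : Prop := out = fields_for_mode_py_alt mode
instance (mode : String) (out : List String) : Decidable (Spec_fields_for_mode_py mode out) := by unfold Spec_fields_for_mode_py; infer_instance

-- ===== CLAIM (what is proved, stated in full; the proofs are below) =====
def Claim_equal_fields_for_mode_py : Prop := ∀ (mode : String), Dom_fields_for_mode_py mode → Spec_fields_for_mode_py mode (fields_for_mode_py mode)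

-- ===== LEMMAS AND PROOFS =====

-- ===== VERDICT (by name: the statement is the Claim_ definition above) =====
theorem fields_for_mode_py_spec : Claim_equal_fields_for_mode_py := by
  intro mode _
  unfold Spec_fields_for_mode_py
  by_cases h1 : mode = "metadata"; · subst h1; decide
  by_cases h2 : mode = "method"; · subst h2; decide
  by_cases h3 : mode = "experiment"; · subst h3; decide
  by_cases h4 : mode = "full"; · subst h4; decide
  have b1 : ("metadata" == mode) = false := beq_eq_false_iff_ne.mpr (Ne.symm h1)
  have b2 : ("method" == mode) = false := beq_eq_false_iff_ne.mpr (Ne.symm h2)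
  have b3 : ("experiment" == mode) = false := beq_eq_false_iff_ne.mpr (Ne.symm h3)
  have b4 : ("full" == mode) = false := beq_eq_false_iff_ne.mpr (Ne.symm h4)
  simp [fields_for_mode_py, fields_for_mode_py_alt, pvALoop, pvCumulative, pvModeFields,
    PySem.Dict.ofList, PySem.Dict.insert, PySem.Dict.empty,
    PySem.Dict.update, PySem.Dict.get?, b1, b2, b3, b4]
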